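-- pv_equiv track=rewrite | github.com/agamil245/acropolis-bot | src/strategies/streak.py | detect_streak
-- ===== SOURCE A (Python) =====
-- def detect_streak(outcomes: list[str]) -> tuple[int, str]:
--     """Detect the current streak at the tail of an outcome list.
--
--     Args:
--         outcomes: e.g. ["up", "down", "up", "up", "up"]
--
--     Returns:
--         (streak_length, streak_direction)
--     """
--     if not outcomes:
--         return 0, ""
--
--     current = outcomes[-1].lower()
--     length = 1
--
--     for i in range(len(outcomes) - 2, -1, -1):
--         if outcomes[i].lower() == current:
--             length += 1
--         else:
--             break
--
--     return length, current
-- ===== SOURCE B (Python) =====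
-- def detect_streak(outcomes: list[str]) -> tuple[int, str]:
--     """Detect the current streak at the tail of an outcome list.
--
--     Forward single pass: track the index where the current (last) run of
--     equal lowered values begins; the tail streak is everything after it.
--     """
--     if not outcomes:
--         return 0, ""
--     start = 0
--     prev = None
--     for i, o in enumerate(outcomes):
--         cur = o.lower()
--         if cur != prev:
--             start = i
--         prev = cur
--     return len(outcomes) - start, prev
-- ===== Notes on version B (the rewrite author's own statement) =====
-- stated objective: alternative
-- what changed: Replaces A's backward tail scan with break (compare each trailing element to the fixed lowered last value) with a forward single pass over the whole list that maintains the start index of the current run of equal lowered values; the answer is len(outcomes) - start and the last lowered value.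
import Mathlib
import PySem

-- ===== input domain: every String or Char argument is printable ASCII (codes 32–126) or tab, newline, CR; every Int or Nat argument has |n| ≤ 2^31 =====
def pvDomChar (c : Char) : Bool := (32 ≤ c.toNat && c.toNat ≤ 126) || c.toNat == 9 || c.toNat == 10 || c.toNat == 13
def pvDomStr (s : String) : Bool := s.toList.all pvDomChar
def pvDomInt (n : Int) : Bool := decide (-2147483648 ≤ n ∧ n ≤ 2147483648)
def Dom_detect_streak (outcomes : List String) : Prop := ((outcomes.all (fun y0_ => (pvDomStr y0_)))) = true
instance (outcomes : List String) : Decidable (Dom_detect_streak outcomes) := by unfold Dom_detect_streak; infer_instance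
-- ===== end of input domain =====

-- B replaces A's backward tail scan (break on first mismatch with the lowered last value) with a
-- forward single pass that tracks the start index of the current run of equal lowered values.

-- ===== PORT A =====
-- the 'for i in range(len(outcomes)-2, -1, -1): … break' loop; returns the final 'length'
def dsLoop (outcomes : List String) (current : String) : List Int → Int → Int
  | [], length => length
  | i :: rest, length =>
      if PySem.Str.lower (PySem.List.pyGetD outcomes i "") == current then
        dsLoop outcomes current rest (length + 1)
      else length   -- break

def detect_streak (outcomes : List String) : Int × String :=
  if outcomes = [] then (0, "")
  else
    let current := PySem.Str.lower (PySem.List.pyGetD outcomes (-1) "")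
    (dsLoop outcomes current (PySem.List.pyRange ((outcomes.length : Int) - 2) (-1) (-1)) 1,
     current)

-- ===== PORT B =====
-- forward pass: 'for i, o in enumerate(outcomes): cur = o.lower(); if cur != prev: start = i; prev = cur'
def detect_streak_alt (outcomes : List String) : Int × String :=
  if outcomes = [] then (0, "")
  else
    let st := (PySem.List.enumerate outcomes).foldl
      (fun (s : Int × Option String) p =>
        let cur := PySem.Str.lower p.2
        ((if some cur ≠ s.2 then p.1 else s.1), some cur))
      ((0 : Int), (none : Option String))
    ((outcomes.length : Int) - st.1, st.2.getD "")

-- ===== PRECONDITION & SPEC =====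
def Spec_detect_streak (outcomes : List String) (out : Int × String) : Prop := out = detect_streak_alt outcomes
instance (outcomes : List String) (out : Int × String) : Decidable (Spec_detect_streak outcomes out) := by unfold Spec_detect_streak; infer_instance

-- ===== CLAIM (what is proved, stated in full; the proofs are below) =====
def Claim_equal_detect_streak : Prop := ∀ (outcomes : List String), Dom_detect_streak outcomes → Spec_detect_streak outcomes (detect_streak outcomes)

-- ===== LEMMAS AND PROOFS =====

-- length of the tail run of l whose lowered value is c
def tailRun (l : List String) (c : String) : Nat :=
  (l.reverse.takeWhile (fun s => PySem.Str.lower s == c)).length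

-- A's loop over the descending index range [k, k-1, …, 0] counts the leading run of
-- (take (k+1) l).reverse whose lowered value equals c.
lemma dsLoop_spec (l : List String) (c : String) :
    ∀ (k : Nat) (len : Int), k < l.length →
      dsLoop l c (PySem.List.pyRange (k : Int) (-1) (-1)) len
        = len + ((((l.take (k+1)).reverse.takeWhile (fun s => PySem.Str.lower s == c)).length : Nat) : Int) := by
  intro k
  induction k with
  | zero =>
    intro len hk
    rw [PySem.List.pyRange_neg_one_cons (by norm_num), PySem.List.pyRange_neg_one_eq_nil (by norm_num)]
    have h0 : l.take 1 = [l[0]] := by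
      cases l with
      | nil => simp at hk
      | cons a t => simp
    have hget0 : PySem.List.pyGetD l 0 "" = l[0] := by
      rw [PySem.List.pyGetD_zero]
      exact List.getD_eq_getElem l "" hk
    by_cases hc : PySem.Str.lower l[0] == c
    · simp [dsLoop, h0, hget0, hc]
    · simp [dsLoop, h0, hget0, hc]
  | succ k ih =>
    intro len hk
    have hk' : k < l.length := Nat.lt_of_succ_lt hk
    have hrange : PySem.List.pyRange ((k+1 : Nat) : Int) (-1) (-1)
        = ((k+1 : Nat) : Int) :: PySem.List.pyRange (k : Int) (-1) (-1) := by
      have := PySem.List.pyRange_neg_one_cons (a := ((k+1 : Nat) : Int)) (b := (-1)) (by push_cast; omega)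
      simpa using this
    have hget : PySem.List.pyGetD l ((k+1 : Nat) : Int) "" = l[k+1] := by
      rw [PySem.List.pyGetD_natCast]
      exact List.getD_eq_getElem l "" hk
    have htake : (l.take (k+2)).reverse = l[k+1] :: (l.take (k+1)).reverse := by
      rw [List.take_add_one]
      simp [List.getElem?_eq_getElem hk]
    rw [hrange]
    simp only [dsLoop, hget]
    rw [htake]
    by_cases hc : PySem.Str.lower l[k+1] == c
    · rw [if_pos hc, ih (len + 1) hk']
      simp [List.takeWhile, hc]
      omega
    · rw [if_neg hc]
      simp [List.takeWhile, hc]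

-- a nonempty list reversed is its last element followed by the reversed dropLast
lemma reverse_eq_getLast_cons (l : List String) (h : l ≠ []) :
    l.reverse = l.getLast h :: l.dropLast.reverse := by
  conv_lhs => rw [← List.dropLast_append_getLast h]
  simp

-- B's fold invariant: on nonempty l the state is (length - streak, some (lower last))
lemma alt_fold_spec (l : List String) (h : l ≠ []) :
    (PySem.List.enumerate l).foldl
      (fun (s : Int × Option String) p =>
        let cur := PySem.Str.lower p.2
        ((if some cur ≠ s.2 then p.1 else s.1), some cur))
      ((0 : Int), (none : Option String))
    = ((l.length : Int) - (1 + (tailRun l.dropLast (PySem.Str.lower (l.getLast h)) : Int)),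
       some (PySem.Str.lower (l.getLast h))) := by
  induction l using List.reverseRecOn with
  | nil => exact absurd rfl h
  | append_singleton xs a ih =>
    rw [PySem.List.enumerate_append, List.foldl_append]
    by_cases hxs : xs = []
    · subst hxs
      simp [PySem.List.enumerate, tailRun]
    · rw [ih hxs]
      have hlast : (xs ++ [a]).getLast (by simp) = a := by simp
      have hdrop : (xs ++ [a]).dropLast = xs := by simp
      simp only [PySem.List.enumerate, List.foldl_cons, List.foldl_nil, hlast, hdrop]
      by_cases hc : PySem.Str.lower a = PySem.Str.lower (xs.getLast hxs)
      · -- run continues: start unchanged, streak grows by one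
        have hcond : ¬ (some (PySem.Str.lower a) ≠ some (PySem.Str.lower (xs.getLast hxs))) := by
          simp [hc]
        rw [if_neg hcond]
        have htr : tailRun xs (PySem.Str.lower a)
            = 1 + tailRun xs.dropLast (PySem.Str.lower (xs.getLast hxs)) := by
          unfold tailRun
          rw [reverse_eq_getLast_cons xs hxs, List.takeWhile_cons_of_pos (by simp [hc])]
          simp [hc]
          omega
        rw [htr]
        rw [Prod.mk.injEq]
        exact ⟨by simp; push_cast; omega, rfl⟩
      · -- run breaks: start = xs.length, streak = 1
        have hcond : (some (PySem.Str.lower a) ≠ some (PySem.Str.lower (xs.getLast hxs))) := by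
          simp [hc]
        rw [if_pos hcond]
        have htr : tailRun xs (PySem.Str.lower a) = 0 := by
          unfold tailRun
          rw [reverse_eq_getLast_cons xs hxs,
            List.takeWhile_cons_of_neg (by simpa using fun h' => hc h'.symm)]
          simp
        rw [htr]
        rw [Prod.mk.injEq]
        exact ⟨by simp, rfl⟩

-- ===== VERDICT (by name: the statement is the Claim_ definition above) =====
theorem detect_streak_spec : Claim_equal_detect_streak := by
  intro outcomes _
  unfold Spec_detect_streak detect_streak detect_streak_alt
  by_cases hne : outcomes = []
  · subst hne; rfl
  · rw [if_neg hne, if_neg hne]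
    have hlast : PySem.List.pyGetD outcomes (-1) "" = outcomes.getLast hne := by
      rw [PySem.List.pyGetD_neg_one outcomes "" hne]
    rw [alt_fold_spec outcomes hne]
    simp only [hlast, Option.getD_some]
    refine Prod.ext ?_ rfl
    -- the A-side length
    rcases ht : outcomes.dropLast with _ | ⟨x, xs⟩
    · -- single-element list: the range is empty
      have hlen : outcomes.length = 1 := by
        have := congrArg List.length ht
        simp [List.length_dropLast] at this
        have hpos : 0 < outcomes.length := List.length_pos_iff.mpr hne
        omega
      have hr : PySem.List.pyRange ((outcomes.length : Int) - 2) (-1) (-1) = [] := by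
        rw [hlen]; exact PySem.List.pyRange_neg_one_eq_nil (by norm_num)
      rw [← ht]
      simp [hr, dsLoop, tailRun, ht]
    · -- at least two elements
      rw [← ht]
      have hlen2 : 2 ≤ outcomes.length := by
        have := congrArg List.length ht
        simp [List.length_dropLast] at this
        omega
      have hcast : (outcomes.length : Int) - 2 = ((outcomes.length - 2 : Nat) : Int) := by
        omega
      have hklt : outcomes.length - 2 < outcomes.length := by omega
      have htake : outcomes.take (outcomes.length - 2 + 1) = outcomes.dropLast := by
        rw [List.dropLast_eq_take]
        congr 1
        omega
      rw [hcast,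
        dsLoop_spec outcomes (PySem.Str.lower (outcomes.getLast hne)) (outcomes.length - 2) 1 hklt,
        htake]
      unfold tailRun
      push_cast
      omega
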